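-- pv_equiv track=rewrite | github.com/vikas-t/DS-Algo | full-problems/steppingNumber.py | bfs
-- ===== SOURCE A (Python) =====
-- def bfs(x, n, res):
--     """
--     The stepping number is generated from existing stepping numbers
--     for ex: 1 generates 12, 10
--             2  generates 21, 23
--     """
--     q = []
--     q.append(x)
--
--     while q:
--         p = q.pop(0)
--
--         if p <= n:
--             res.append(p)
--             d = p%10
--             if d == 0:
--                 q.append(p*10+(d+1))
--             elif d == 9:
--                 q.append(p*10+(d-1))
--             else:
--                 q.append(p*10+(d+1))
--                 q.append(p*10+(d-1))
--     return res
-- ===== SOURCE B (Python) =====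
-- def bfs(x, n, res):
--     """Recursive tree decomposition instead of a FIFO queue: the levels of the
--     stepping-number tree rooted at p are computed recursively and the two
--     children's level lists are zip-merged; flattening the level list of x gives
--     exactly the BFS output order.  Mutates res like A (extends it in place)."""
--     def merge(a, b):
--         if not a:
--             return b
--         if not b:
--             return a
--         return [a[0] + b[0]] + merge(a[1:], b[1:])
--
--     def levels(p):
--         if p > n:
--             return []
--         d = p % 10
--         hi = levels(p * 10 + (d + 1)) if d != 9 else []
--         lo = levels(p * 10 + (d - 1)) if d != 0 else []
--         return [[p]] + merge(hi, lo)
--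
--     for level in levels(x):
--         res.extend(level)
--     return res
-- ===== Notes on version B (the rewrite author's own statement) =====
-- stated objective: alternative
-- what changed: Replaces the iterative FIFO-queue BFS (list with pop(0)) by a recursive decomposition with no queue at all: levels(p) computes the per-depth level lists of the stepping-number tree rooted at p by recursion, zip-merging the two children's level lists, and the flattened level list is the BFS output.
import Mathlib
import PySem

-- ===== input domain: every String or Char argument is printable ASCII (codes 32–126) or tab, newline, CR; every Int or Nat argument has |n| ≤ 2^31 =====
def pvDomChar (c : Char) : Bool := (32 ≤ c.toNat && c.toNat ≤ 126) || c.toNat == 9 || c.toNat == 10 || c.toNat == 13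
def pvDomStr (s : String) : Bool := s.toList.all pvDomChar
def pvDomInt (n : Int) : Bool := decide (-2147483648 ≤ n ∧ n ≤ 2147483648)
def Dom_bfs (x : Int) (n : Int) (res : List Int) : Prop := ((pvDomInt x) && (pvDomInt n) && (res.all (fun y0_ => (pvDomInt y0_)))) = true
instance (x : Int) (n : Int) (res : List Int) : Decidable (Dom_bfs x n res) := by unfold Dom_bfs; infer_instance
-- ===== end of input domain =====

-- B replaces A's FIFO-queue BFS by a recursive per-level tree decomposition (zip-merged
-- level lists, then flattened); return value only: both also extend `res` in place.


-- ===== PORT A =====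
-- fuel = number of pops; a totality guard only, proved sufficient for every admitted input
def pvFuelA : Nat := 8192  -- > 1 + 2*(2^12 - 1), enough pops for any admitted input (proved below)

-- one dequeue step per unit of fuel; queue `q`, accumulator `res`
def bfsLoopA (n : Int) : Nat → List Int → List Int → List Int
  | 0, _, res => res
  | _ + 1, [], res => res
  | fuel + 1, p :: q, res =>
    if p ≤ n then
      let d := PySem.Int.mod p 10
      let q' :=
        if d = 0 then q ++ [p * 10 + (d + 1)]
        else if d = 9 then q ++ [p * 10 + (d - 1)]
        else q ++ [p * 10 + (d + 1)] ++ [p * 10 + (d - 1)]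
      bfsLoopA n fuel q' (res ++ [p])
    else bfsLoopA n fuel q res

def bfs (x : Int) (n : Int) (res : List Int) : List Int :=
  bfsLoopA n pvFuelA [x] res

-- ===== PORT B =====
-- zip-merge of two level lists (Source B's recursive `merge`)
def mrg : List (List Int) → List (List Int) → List (List Int)
  | [], b => b
  | a, [] => a
  | a :: as_, b :: bs => (a ++ b) :: mrg as_ bs

-- fuel = recursion depth; a totality guard only, proved sufficient for every admitted input
def pvFuelB : Nat := 12

-- Source B's `levels`: the per-depth level lists of the stepping tree rooted at p
def levelsB (n : Int) : Nat → Int → List (List Int)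
  | 0, _ => []
  | f + 1, p =>
    if n < p then []
    else
      let d := PySem.Int.mod p 10
      let hi := if d ≠ 9 then levelsB n f (p * 10 + (d + 1)) else []
      let lo := if d ≠ 0 then levelsB n f (p * 10 + (d - 1)) else []
      [p] :: mrg hi lo

-- the final `for level in levels(x): res.extend(level)` loop is concatenation
def bfs_alt (x : Int) (n : Int) (res : List Int) : List Int :=
  res ++ (levelsB n pvFuelB x).flatten

-- ===== PRECONDITION & SPEC =====
-- Pre_ excludes exactly the inputs with x < 0 ∧ x ≤ n, on which Python A never returns
-- (the queue descends through ever more negative values forever).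
def Pre_bfs (x : Int) (n : Int) (res : List Int) : Prop := 0 ≤ x ∨ n < x
instance (x : Int) (n : Int) (res : List Int) : Decidable (Pre_bfs x n res) := by unfold Pre_bfs; infer_instance

def pvWitness_bfs : Int × Int × List Int := (1, 30, [])

def Spec_bfs (x : Int) (n : Int) (res : List Int) (out : List Int) : Prop := out = bfs_alt x n res
instance (x : Int) (n : Int) (res : List Int) (out : List Int) : Decidable (Spec_bfs x n res out) := by unfold Spec_bfs; infer_instance

-- ===== CLAIM (what is proved, stated in full; the proofs are below) =====
def Claim_equal_bfs : Prop := ∀ (x : Int) (n : Int) (res : List Int), Dom_bfs x n res → Pre_bfs x n res → Spec_bfs x n res (bfs x n res)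

-- ===== LEMMAS AND PROOFS =====

theorem mrg_nil_left (b : List (List Int)) : mrg [] b = b := rfl

theorem mrg_nil_right (a : List (List Int)) : mrg a [] = a := by
  cases a <;> rfl

theorem mrg_assoc : ∀ (a b c : List (List Int)), mrg (mrg a b) c = mrg a (mrg b c) := by
  intro a
  induction a with
  | nil => intro b c; rfl
  | cons a0 as_ ih =>
    intro b c
    cases b with
    | nil => rfl
    | cons b0 bs =>
      cases c with
      | nil => rfl
      | cons c0 cs => simp [mrg, ih, List.append_assoc]

theorem mrg_flatten_length : ∀ (a b : List (List Int)),
    (mrg a b).flatten.length = a.flatten.length + b.flatten.length := by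
  intro a
  induction a with
  | nil => intro b; simp [mrg]
  | cons a0 as_ ih =>
    intro b
    cases b with
    | nil => simp [mrg]
    | cons b0 bs => simp [mrg, ih]; omega

-- BFS swap identity: emitting the root `a` of the first tree moves the rest of its
-- levels behind the other forest's levels
theorem swapFlat : ∀ (k : Nat) (A B : List (List Int)) (a : List Int),
    A.length + B.length ≤ k →
    (mrg (a :: A) B).flatten = a ++ (mrg B A).flatten := by
  intro k
  induction k with
  | zero =>
    intro A B a h
    have hA : A = [] := by cases A <;> simp_all
    have hB : B = [] := by cases B <;> simp_all
    subst hA; subst hB; simp [mrg]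
  | succ k ih =>
    intro A B a h
    cases B with
    | nil => simp [mrg]
    | cons b0 bs =>
      have h1 : bs.length + A.length ≤ k := by simp at h; omega
      simp only [mrg, List.flatten_cons]
      rw [ih bs A b0 h1]
      simp [List.append_assoc]

-- merged levels of a queue, at B's fuel
def MA (n : Int) (q : List Int) : List (List Int) :=
  q.foldr (fun p acc => mrg (levelsB n pvFuelB p) acc) []

theorem MA_append (n : Int) : ∀ (q r : List Int), MA n (q ++ r) = mrg (MA n q) (MA n r) := by
  intro q
  induction q with
  | nil => intro r; rfl
  | cons p q' ih => intro r; simp [MA, List.foldr] at *; rw [ih, ← mrg_assoc]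

-- one-step unfolding of levelsB (definitional)
theorem levelsB_succ (n : Int) (f : Nat) (p : Int) :
    levelsB n (f + 1) p =
      (if n < p then []
       else
         let d := PySem.Int.mod p 10
         [p] :: mrg (if d ≠ 9 then levelsB n f (p * 10 + (d + 1)) else [])
                    (if d ≠ 0 then levelsB n f (p * 10 + (d - 1)) else [])) := rfl

-- digit facts
theorem mod10_bounds (p : Int) (hp : 0 ≤ p) :
    0 ≤ PySem.Int.mod p 10 ∧ PySem.Int.mod p 10 ≤ 9 := by
  have h1 := PySem.Int.mod_nonneg p (b := 10) (by omega)
  have h2 := PySem.Int.mod_lt p (b := 10) (by omega)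
  omega

-- one extra unit of fuel changes nothing once the value bound guarantees cut-off
theorem levelsB_stable_one (n : Int) : ∀ (f : Nat) (p : Int), 1 ≤ p →
    9 * n < 10 ^ f * (9 * p - 1) → levelsB n (f + 1) p = levelsB n f p := by
  intro f
  induction f with
  | zero =>
    intro p hp h
    have hnp : n < p := by omega
    simp [levelsB, hnp]
  | succ f ih =>
    intro p hp h
    by_cases hpn : n < p
    · rw [levelsB_succ n (f + 1) p, levelsB_succ n f p]
      simp [hpn]
    · have hp0 : 0 ≤ p := by omega
      obtain ⟨hd0, hd9⟩ := mod10_bounds p hp0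
      set d := PySem.Int.mod p 10 with hd
      have hpow : (0:Int) < 10 ^ f := by positivity
      have hchild : ∀ e : Int, -1 ≤ e → 9 * n < 10 ^ f * (9 * (p * 10 + e) - 1) := by
        intro e he
        have : (10:Int) ^ (f + 1) * (9 * p - 1) ≤ 10 ^ f * (9 * (p * 10 + e) - 1) := by
          have : (10:Int) ^ (f+1) = 10 ^ f * 10 := by ring
          rw [this]
          nlinarith [hpow]
        omega
      have hhi : 1 ≤ p * 10 + (d + 1) := by omega
      have hlo : d ≠ 0 → 1 ≤ p * 10 + (d - 1) := by
        intro h0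
        have hp1 : 1 ≤ p ∨ p = 0 := by omega
        rcases hp1 with h1 | h1
        · omega
        · exfalso; apply h0; rw [hd, h1]; rfl
      rw [levelsB_succ n (f + 1) p, levelsB_succ n f p]
      simp only [hpn, if_false, ← hd]
      by_cases h9 : d = 9
      · simp only [h9]
        norm_num
        rw [ih _ (by omega) (hchild _ (by omega))]
      · by_cases h0 : d = 0
        · simp only [h0]
          norm_num
          rw [ih _ (by omega) (hchild _ (by omega))]
        · simp only [ne_eq, h9, not_false_iff, if_pos, h0]
          rw [ih _ hhi (hchild _ (by omega)), ih _ (hlo h0) (hchild _ (by omega))]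

theorem levelsB_stable (n : Int) (hn : n ≤ 2147483648) :
    ∀ (k f : Nat) (p : Int), 11 ≤ f → 1 ≤ p → levelsB n (f + k) p = levelsB n f p := by
  intro k
  induction k with
  | zero => intro f p _ _; rfl
  | succ k ih =>
    intro f p hf hp
    have hbound : 9 * n < 10 ^ (f + k) * (9 * p - 1) := by
      have h1 : (10:Int) ^ 11 ≤ 10 ^ (f + k) := by
        apply pow_le_pow_right₀ (by norm_num) (by omega)
      have h2 : (1:Int) ≤ 9 * p - 1 := by omega
      nlinarith [h1, h2]
    have : f + (k + 1) = (f + k) + 1 := by omega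
    rw [this, levelsB_stable_one n (f + k) p hp hbound, ih f p hf hp]

-- unfolding B's levels at full fuel (children lifted back to full fuel by stability)
theorem levelsB_unfold (n : Int) (hn : n ≤ 2147483648) (p : Int) (hp : 0 ≤ p) (hpn : p ≤ n) :
    levelsB n pvFuelB p =
      [p] :: mrg
        (if PySem.Int.mod p 10 ≠ 9 then levelsB n pvFuelB (p * 10 + (PySem.Int.mod p 10 + 1)) else [])
        (if PySem.Int.mod p 10 ≠ 0 then levelsB n pvFuelB (p * 10 + (PySem.Int.mod p 10 - 1)) else []) := by
  obtain ⟨hd0, hd9⟩ := mod10_bounds p hp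
  set d := PySem.Int.mod p 10 with hd
  have hstep : ∀ c : Int, 1 ≤ c → levelsB n 11 c = levelsB n pvFuelB c := by
    intro c hc
    have h1 := levelsB_stable n hn 1 11 c (by omega) hc
    show levelsB n 11 c = levelsB n 12 c
    have e1 : (11:Nat) + 1 = 12 := by norm_num
    rw [e1] at h1; rw [h1]
  have hnp : ¬ n < p := by omega
  conv_lhs => rw [show levelsB n pvFuelB p = levelsB n (11 + 1) p from rfl, levelsB_succ n 11 p]
  simp only [hnp, if_false, ← hd]
  by_cases h9 : d = 9
  · simp only [h9]
    norm_num
    rw [hstep _ (by omega)]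
  · by_cases h0 : d = 0
    · simp only [h0]
      norm_num
      rw [hstep _ (by omega)]
    · have hp1 : 1 ≤ p := by
        rcases (by omega : 1 ≤ p ∨ p = 0) with h | h
        · exact h
        · exfalso; apply h0; rw [hd, h]; rfl
      simp only [ne_eq, h9, h0, not_false_iff, if_pos]
      rw [hstep _ (by omega), hstep _ (by omega)]

-- size bound for the fuel-sufficiency argument
theorem levelsB_flatten_le (n : Int) : ∀ (f : Nat) (p : Int),
    (levelsB n f p).flatten.length + 1 ≤ 2 ^ f := by
  intro f
  induction f with
  | zero => intro p; simp [levelsB]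
  | succ f ih =>
    intro p
    by_cases hpn : n < p
    · rw [levelsB_succ]
      simp only [hpn, if_true]
      have : (1:Nat) ≤ 2 ^ f := Nat.one_le_two_pow
      have hp : (2:Nat) ^ (f + 1) = 2 ^ f + 2 ^ f := by ring
      simp
      omega
    · rw [levelsB_succ]
      have h1 : (if PySem.Int.mod p 10 ≠ 9 then levelsB n f (p * 10 + (PySem.Int.mod p 10 + 1)) else []).flatten.length + 1 ≤ 2 ^ f := by
        split
        · exact ih _
        · simpa using Nat.one_le_two_pow
      have h2 : (if PySem.Int.mod p 10 ≠ 0 then levelsB n f (p * 10 + (PySem.Int.mod p 10 - 1)) else []).flatten.length + 1 ≤ 2 ^ f := by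
        split
        · exact ih _
        · simpa using Nat.one_le_two_pow
      have hp : (2:Nat) ^ (f + 1) = 2 ^ f + 2 ^ f := by ring
      simp only [hpn, if_false, List.flatten_cons, List.length_append,
        List.length_cons, List.length_nil, mrg_flatten_length]
      omega

-- A's dequeue loop, given enough fuel, emits the flattened merged levels of its queue
theorem Asuff (n : Int) (hn : n ≤ 2147483648) :
    ∀ (f : Nat) (q res : List Int),
      (∀ p ∈ q, 0 ≤ p ∨ n < p) →
      q.length + 2 * (MA n q).flatten.length ≤ f →
      bfsLoopA n f q res = res ++ (MA n q).flatten := by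
  intro f
  induction f with
  | zero =>
    intro q res hq hf
    have : q = [] := by cases q <;> simp_all
    subst this
    simp [bfsLoopA, MA]
  | succ f ih =>
    intro q res hq hf
    cases q with
    | nil => simp [bfsLoopA, MA]
    | cons p q' =>
      have hMA : MA n (p :: q') = mrg (levelsB n pvFuelB p) (MA n q') := rfl
      by_cases hpn : p ≤ n
      · have hp0 : 0 ≤ p := by
          rcases hq p (by simp) with h | h
          · exact h
          · omega
        obtain ⟨hd0, hd9⟩ := mod10_bounds p hp0
        have hunf := levelsB_unfold n hn p hp0 hpn
        set d := PySem.Int.mod p 10 with hd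
        -- the children appended by A, per branch
        have hhi1 : 1 ≤ p * 10 + (d + 1) := by omega
        have hlo1 : d ≠ 0 → 1 ≤ p * 10 + (d - 1) := by
          intro h0
          rcases (by omega : 1 ≤ p ∨ p = 0) with h | h
          · omega
          · exfalso; apply h0; rw [hd, h]; rfl
        simp only [bfsLoopA, if_pos hpn, ← hd]
        by_cases h0 : d = 0
        · -- single child hi
          have h9 : d ≠ 9 := by omega
          have hT : MA n (p :: q') = mrg ([p] :: levelsB n pvFuelB (p * 10 + (d + 1))) (MA n q') := by
            rw [hMA, hunf]
            simp [h0, mrg_nil_right]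
          have hcs : MA n (q' ++ [p * 10 + (d + 1)]) =
              mrg (MA n q') (levelsB n pvFuelB (p * 10 + (d + 1))) := by
            rw [MA_append]; simp [MA, mrg_nil_right]
          rw [if_pos h0]
          rw [ih (q' ++ [p * 10 + (d + 1)]) (res ++ [p])]
          · rw [hcs, hT]
            rw [swapFlat ((levelsB n pvFuelB (p * 10 + (d + 1))).length + (MA n q').length) _ _ _ (le_refl _)]
            simp [List.append_assoc]
          · intro c hc
            rcases List.mem_append.1 hc with h | h
            · exact hq c (by simp [h])
            · simp at h; subst h; left; omega
          · have hlen := mrg_flatten_length ([p] :: levelsB n pvFuelB (p * 10 + (d + 1))) (MA n q')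
            rw [hT] at hf
            rw [hcs, mrg_flatten_length]
            simp only [List.length_append, List.length_cons, List.length_nil] at *
            simp only [List.flatten_cons, List.length_append, List.length_cons,
              List.length_nil] at hlen
            omega
        · by_cases h9 : d = 9
          · -- single child lo
            have hT : MA n (p :: q') = mrg ([p] :: levelsB n pvFuelB (p * 10 + (d - 1))) (MA n q') := by
              rw [hMA, hunf]
              simp [h9, mrg_nil_left]
            have hcs : MA n (q' ++ [p * 10 + (d - 1)]) =
                mrg (MA n q') (levelsB n pvFuelB (p * 10 + (d - 1))) := by
              rw [MA_append]; simp [MA, mrg_nil_right]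
            rw [if_neg h0, if_pos h9]
            rw [ih (q' ++ [p * 10 + (d - 1)]) (res ++ [p])]
            · rw [hcs, hT]
              rw [swapFlat ((levelsB n pvFuelB (p * 10 + (d - 1))).length + (MA n q').length) _ _ _ (le_refl _)]
              simp [List.append_assoc]
            · intro c hc
              rcases List.mem_append.1 hc with h | h
              · exact hq c (by simp [h])
              · simp at h; subst h; left; exact le_trans (by omega) (hlo1 h0)
            · rw [hT] at hf
              rw [hcs]
              simp only [mrg_flatten_length, List.flatten_cons, List.length_append,
                List.length_cons, List.length_nil] at hf ⊢
              omega
          · -- two children hi, lo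
            have hT : MA n (p :: q') =
                mrg ([p] :: mrg (levelsB n pvFuelB (p * 10 + (d + 1))) (levelsB n pvFuelB (p * 10 + (d - 1)))) (MA n q') := by
              rw [hMA, hunf]
              simp [h0, h9]
            have hcs : MA n (q' ++ [p * 10 + (d + 1)] ++ [p * 10 + (d - 1)]) =
                mrg (MA n q') (mrg (levelsB n pvFuelB (p * 10 + (d + 1))) (levelsB n pvFuelB (p * 10 + (d - 1)))) := by
              rw [MA_append, MA_append]
              simp [MA, mrg_nil_right, mrg_assoc]
            rw [if_neg h0, if_neg h9]
            rw [ih (q' ++ [p * 10 + (d + 1)] ++ [p * 10 + (d - 1)]) (res ++ [p])]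
            · rw [hcs, hT]
              rw [swapFlat ((mrg (levelsB n pvFuelB (p * 10 + (d + 1))) (levelsB n pvFuelB (p * 10 + (d - 1)))).length + (MA n q').length) _ _ _ (le_refl _)]
              simp [List.append_assoc]
            · intro c hc
              rcases List.mem_append.1 hc with h | h
              · rcases List.mem_append.1 h with h | h
                · exact hq c (by simp [h])
                · simp at h; subst h; left; omega
              · simp at h; subst h; left; exact le_trans (by omega) (hlo1 h0)
            · rw [hT] at hf
              rw [hcs]
              simp only [mrg_flatten_length, List.flatten_cons, List.length_append,
                List.length_cons, List.length_nil] at hf ⊢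
              omega
      · -- p skipped: its levels are empty
        have hL : levelsB n pvFuelB p = [] := by
          have : pvFuelB = 11 + 1 := rfl
          rw [this, levelsB_succ]
          simp [show n < p by omega]
        simp only [bfsLoopA, if_neg hpn]
        rw [ih q' res (fun c hc => hq c (by simp [hc]))]
        · rw [hMA, hL]
          rfl
        · rw [hMA, hL] at hf
          simp only [List.length_cons] at hf
          have : mrg ([] : List (List Int)) (MA n q') = MA n q' := rfl
          rw [this] at hf
          omega

-- ===== VERDICT (by name: the statement is the Claim_ definition above) =====
theorem bfs_spec : Claim_equal_bfs := by
  intro x n res hdom hpre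
  unfold Spec_bfs bfs bfs_alt
  have hn : n ≤ 2147483648 := by
    simp [Dom_bfs, pvDomInt] at hdom
    omega
  have hMA : MA n [x] = levelsB n pvFuelB x := by
    simp [MA, mrg_nil_right]
  rw [Asuff n hn pvFuelA [x] res]
  · rw [hMA]
  · intro p hp
    simp at hp
    subst hp
    exact hpre
  · rw [hMA]
    have hb := levelsB_flatten_le n pvFuelB x
    have : (2:Nat) ^ pvFuelB = 4096 := by norm_num [pvFuelB]
    simp only [List.length_cons, List.length_nil]
    have hA : pvFuelA = 8192 := rfl
    omega
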